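-- pv_equiv track=rewrite | github.com/aksoyfiliz/filiz | filiz/find_point.py | find_point
-- ===== SOURCE A (Python) =====
-- def find_point(c,p,A,B):
--     result = []
--     for x in range (p):
--         for y in range (p-1):
--             y_square = (y*y)%p
--             f_x = (x**3 + A*x + B)%p
--             if (y_square == f_x):
--                 result.append([x,y])
--                 c -= 1
--                 if (c==0):
--                     return result
--
--     return result
-- ===== SOURCE B (Python) =====
-- def find_point(c, p, A, B):
--     roots = {}
--     for y in range(p - 1):
--         roots.setdefault(y * y % p, []).append(y)
--     result = []
--     for x in range(p):
--         for y in roots.get((x ** 3 + A * x + B) % p, []):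
--             result.append([x, y])
--             if len(result) == c:
--                 return result
--     return result
-- ===== Notes on version B (the rewrite author's own statement) =====
-- stated objective: faster
-- what changed: B precomputes one dict mapping each quadratic residue y*y%p to its sorted list of y values, then makes a single pass over x with a dict lookup, instead of A's nested scan of all (x,y) pairs.
import Mathlib
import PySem

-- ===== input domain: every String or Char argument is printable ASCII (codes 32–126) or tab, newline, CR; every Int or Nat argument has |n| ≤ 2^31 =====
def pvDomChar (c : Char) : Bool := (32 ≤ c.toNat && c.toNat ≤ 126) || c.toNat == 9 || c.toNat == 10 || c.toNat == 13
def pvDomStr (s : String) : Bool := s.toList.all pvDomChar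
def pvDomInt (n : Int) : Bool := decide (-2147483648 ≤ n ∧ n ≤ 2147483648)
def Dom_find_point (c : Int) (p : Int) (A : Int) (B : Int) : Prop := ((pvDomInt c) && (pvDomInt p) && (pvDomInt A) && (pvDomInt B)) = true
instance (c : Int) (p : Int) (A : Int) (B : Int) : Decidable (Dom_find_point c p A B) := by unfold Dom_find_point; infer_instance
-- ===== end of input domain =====

-- B replaces A's O(p^2) nested scan by a precomputed residue->y-list dict and one pass over x (objective: faster, asymptotic).

-- ===== PORT A =====
-- inner loop 'for y in range(p-1): …' threading (result, c); third component = early return fired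
def findPointLoopY (x p A B : Int) : List Int → List (List Int) → Int → (List (List Int) × Int × Bool)
  | [], res, c => (res, c, false)
  | y :: ys, res, c =>
    let y_square := PySem.Int.mod (y * y) p
    let f_x := PySem.Int.mod (x ^ 3 + A * x + B) p
    if y_square = f_x then
      let res' := res ++ [[x, y]]
      let c' := c - 1
      if c' = 0 then (res', c', true) else findPointLoopY x p A B ys res' c'
    else findPointLoopY x p A B ys res c

-- outer loop 'for x in range(p): …'
def findPointLoopX (p A B : Int) : List Int → List (List Int) → Int → List (List Int)
  | [], res, _ => res
  | x :: xs, res, c =>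
    match findPointLoopY x p A B (PySem.List.pyRange 0 (p - 1) 1) res c with
    | (res', _, true) => res'
    | (res', c', false) => findPointLoopX p A B xs res' c'

def find_point (c : Int) (p : Int) (A : Int) (B : Int) : List (List Int) :=
  findPointLoopX p A B (PySem.List.pyRange 0 p 1) [] c

-- ===== PORT B =====
-- roots = {}; for y in range(p-1): roots.setdefault(y*y % p, []).append(y)
def findPointRoots (p : Int) : PySem.Dict Int (List Int) :=
  (PySem.List.pyRange 0 (p - 1) 1).foldl
    (fun d y => d.modify (PySem.Int.mod (y * y) p) [] (· ++ [y])) PySem.Dict.empty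

-- inner loop over roots.get(f_x, []); Bool = early return fired (len(result) == c)
def findPointAltLoopY (x c : Int) : List Int → List (List Int) → (List (List Int) × Bool)
  | [], res => (res, false)
  | y :: ys, res =>
    let res' := res ++ [[x, y]]
    if (res'.length : Int) = c then (res', true) else findPointAltLoopY x c ys res'

def findPointAltLoopX (c p A B : Int) (d : PySem.Dict Int (List Int)) :
    List Int → List (List Int) → List (List Int)
  | [], res => res
  | x :: xs, res =>
    match findPointAltLoopY x c (d.getD (PySem.Int.mod (x ^ 3 + A * x + B) p) []) res with
    | (res', true) => res'
    | (res', false) => findPointAltLoopX c p A B d xs res'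

def find_point_alt (c : Int) (p : Int) (A : Int) (B : Int) : List (List Int) :=
  findPointAltLoopX c p A B (findPointRoots p) (PySem.List.pyRange 0 p 1) []

-- ===== PRECONDITION & SPEC =====
def Spec_find_point (c : Int) (p : Int) (A : Int) (B : Int) (out : List (List Int)) : Prop := out = find_point_alt c p A B
instance (c : Int) (p : Int) (A : Int) (B : Int) (out : List (List Int)) : Decidable (Spec_find_point c p A B out) := by unfold Spec_find_point; infer_instance

-- ===== CLAIM (what is proved, stated in full; the proofs are below) =====
def Claim_equal_find_point : Prop := ∀ (c : Int) (p : Int) (A : Int) (B : Int), Dom_find_point c p A B → Spec_find_point c p A B (find_point c p A B)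

-- ===== LEMMAS AND PROOFS =====

-- the dict B builds stores, for each residue t, exactly the y of range(p-1) with y*y % p = t
lemma findPointRoots_getD (p t : Int) :
    (findPointRoots p).getD t [] =
      (PySem.List.pyRange 0 (p - 1) 1).filter
        (fun y => PySem.Int.mod (y * y) p == t) := by
  have hfold : findPointRoots p =
      ((PySem.List.pyRange 0 (p - 1) 1).map (fun y => (PySem.Int.mod (y * y) p, y))).foldl
        (fun (d : PySem.Dict Int (List Int)) pr => d.modify pr.1 [] (· ++ [pr.2]))
        PySem.Dict.empty := by rw [List.foldl_map]; rfl
  rw [hfold, PySem.Dict.getD_foldl_modify_append]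
  simp [List.filter_map, Function.comp_def]

-- inner loops agree when A's counter equals c0 - len(result)
lemma loopY_eq (x p A B c0 : Int) : ∀ (ys : List Int) (res : List (List Int)),
    findPointLoopY x p A B ys res (c0 - res.length) =
      ((findPointAltLoopY x c0 (ys.filter (fun y =>
          PySem.Int.mod (y * y) p == PySem.Int.mod (x ^ 3 + A * x + B) p)) res).1,
       c0 - (findPointAltLoopY x c0 (ys.filter (fun y =>
          PySem.Int.mod (y * y) p == PySem.Int.mod (x ^ 3 + A * x + B) p)) res).1.length,
       (findPointAltLoopY x c0 (ys.filter (fun y =>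
          PySem.Int.mod (y * y) p == PySem.Int.mod (x ^ 3 + A * x + B) p)) res).2) := by
  intro ys
  induction ys with
  | nil => intro res; simp [findPointLoopY, findPointAltLoopY]
  | cons y ys ih =>
    intro res
    by_cases h : PySem.Int.mod (y * y) p = PySem.Int.mod (x ^ 3 + A * x + B) p
    · simp only [findPointLoopY, findPointAltLoopY, List.filter_cons, h,
        beq_self_eq_true, if_true]
      by_cases hc : (((res ++ [[x, y]]).length : Int)) = c0
      · have h0 : c0 - (res.length : Int) - 1 = 0 := by
          simp at hc; omega
        rw [if_pos h0, if_pos hc, hc]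
        simp
        exact h0
      · have h0 : ¬ (c0 - (res.length : Int) - 1 = 0) := by
          simp at hc ⊢; omega
        have hlen : c0 - (res.length : Int) - 1 = c0 - ((res ++ [[x, y]]).length : Int) := by
          simp; omega
        rw [if_neg h0, if_neg hc, hlen]
        exact ih (res ++ [[x, y]])
    · have hb : (PySem.Int.mod (y * y) p == PySem.Int.mod (x ^ 3 + A * x + B) p) = false := by
        simpa using h
      simp only [findPointLoopY, List.filter_cons, hb,
        if_neg h, Bool.false_eq_true, if_false]
      exact ih res

lemma loopX_eq (p A B c0 : Int) : ∀ (xs : List Int) (res : List (List Int)),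
    findPointLoopX p A B xs res (c0 - res.length) =
      findPointAltLoopX c0 p A B (findPointRoots p) xs res := by
  intro xs
  induction xs with
  | nil => intro res; rfl
  | cons x xs ih =>
    intro res
    simp only [findPointLoopX, findPointAltLoopX, findPointRoots_getD,
      loopY_eq x p A B c0 (PySem.List.pyRange 0 (p - 1) 1) res]
    match hr : findPointAltLoopY x c0
      ((PySem.List.pyRange 0 (p - 1) 1).filter
        (fun y => PySem.Int.mod (y * y) p == PySem.Int.mod (x ^ 3 + A * x + B) p)) res with
    | (res2, true) => simp
    | (res2, false) => simpa using ih res2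

-- ===== VERDICT (by name: the statement is the Claim_ definition above) =====
theorem find_point_spec : Claim_equal_find_point := by
  intro c p A B _
  show find_point c p A B = find_point_alt c p A B
  unfold find_point find_point_alt
  have := loopX_eq p A B c (PySem.List.pyRange 0 p 1) []
  simpa using this
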